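-- pv_equiv track=rewrite | github.com/infosecconsultant/Password-Cracking-Dictionary-Generators | leetspeak-generator.py | predict_permutations
-- ===== SOURCE A (Python) =====
-- def predict_permutations(string, leetspeak_dict):
--     """
--     Predicts the total number of leetspeak permutations for a given string.
--     """
--     total_permutations = 1
--     for char in string:
--         if char in leetspeak_dict:
--             total_permutations *= len(leetspeak_dict[char])
--         else:
--             total_permutations *= 1
--     return total_permutations
-- ===== SOURCE B (Python) =====
-- def predict_permutations(string, leetspeak_dict):
--     """
--     Predicts the total number of leetspeak permutations for a given string.
--     Iterates over the dictionary entries instead of the string: each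
--     single-character key contributes len(options) ** (occurrences in string).
--     """
--     total = 1
--     for key, options in leetspeak_dict.items():
--         if len(key) == 1:
--             total *= len(options) ** string.count(key)
--     return total
-- ===== Notes on version B (the rewrite author's own statement) =====
-- stated objective: alternative
-- what changed: B loops over the dictionary entries rather than over the string: each single-character key contributes one factor len(options) ** string.count(key), replacing A's per-character lookup-and-multiply pass.
import Mathlib
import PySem

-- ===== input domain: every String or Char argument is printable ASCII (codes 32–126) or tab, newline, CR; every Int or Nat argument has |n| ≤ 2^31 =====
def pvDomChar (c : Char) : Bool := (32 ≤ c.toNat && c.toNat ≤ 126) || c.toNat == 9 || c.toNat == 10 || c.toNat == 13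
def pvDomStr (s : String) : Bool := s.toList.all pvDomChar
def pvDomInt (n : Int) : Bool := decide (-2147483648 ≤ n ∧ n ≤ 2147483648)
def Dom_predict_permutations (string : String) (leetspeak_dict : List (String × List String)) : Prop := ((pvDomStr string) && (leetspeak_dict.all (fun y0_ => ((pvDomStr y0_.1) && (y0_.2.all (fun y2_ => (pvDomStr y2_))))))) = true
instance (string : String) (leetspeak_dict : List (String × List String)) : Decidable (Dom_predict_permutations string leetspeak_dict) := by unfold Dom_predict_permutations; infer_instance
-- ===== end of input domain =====

-- B loops over the dictionary entries (one power len(options)^count per single-char key) instead of A's per-character pass over the string; alternative decomposition, same results.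
-- ===== PORT A =====
-- first-match lookup of the one-char key `c` in the dict (Python: `char in leetspeak_dict` / `leetspeak_dict[char]`)
def pvLook (leetspeak_dict : List (String × List String)) (c : Char) : Option (List String) :=
  (leetspeak_dict.find? (fun kv => kv.1.toList == [c])).map (·.2)

def predict_permutations (string : String) (leetspeak_dict : List (String × List String)) : Int :=
  string.toList.foldl (fun total_permutations char =>
    match pvLook leetspeak_dict char with
    | some v => total_permutations * (v.length : Int)
    | none => total_permutations * 1) 1

-- ===== PORT B =====
def predict_permutations_alt (string : String) (leetspeak_dict : List (String × List String)) : Int :=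
  leetspeak_dict.foldl (fun total kv =>
    if PySem.Str.len kv.1 == 1 then
      total * (kv.2.length : Int) ^ (PySem.Str.count string kv.1)
    else total) 1

-- ===== PRECONDITION & SPEC =====
-- Pre_ requires the association list's keys to be distinct: it encodes a Python dict,
-- which cannot hold duplicate keys, so no Python input is excluded.
def Pre_predict_permutations (string : String) (leetspeak_dict : List (String × List String)) : Prop :=
  (leetspeak_dict.map Prod.fst).Nodup
instance (string : String) (leetspeak_dict : List (String × List String)) : Decidable (Pre_predict_permutations string leetspeak_dict) := by unfold Pre_predict_permutations; infer_instance

def pvWitness_predict_permutations : String × (List (String × List String)) :=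
  ("aab", [("a", ["4", "@"]), ("b", ["8"])])

def Spec_predict_permutations (string : String) (leetspeak_dict : List (String × List String)) (out : Int) : Prop := out = predict_permutations_alt string leetspeak_dict
instance (string : String) (leetspeak_dict : List (String × List String)) (out : Int) : Decidable (Spec_predict_permutations string leetspeak_dict out) := by unfold Spec_predict_permutations; infer_instance

-- ===== CLAIM (what is proved, stated in full; the proofs are below) =====
def Claim_equal_predict_permutations : Prop := ∀ (string : String) (leetspeak_dict : List (String × List String)), Dom_predict_permutations string leetspeak_dict → Pre_predict_permutations string leetspeak_dict → Spec_predict_permutations string leetspeak_dict (predict_permutations string leetspeak_dict)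

-- ===== LEMMAS AND PROOFS =====
-- the per-occurrence factor of A
def pvFac (leetspeak_dict : List (String × List String)) (c : Char) : Int :=
  match pvLook leetspeak_dict c with
  | some v => (v.length : Int)
  | none => 1

-- B's product, written over the char list with explicit counts
def pvF (d : List (String × List String)) (s : List Char) : Int :=
  (d.map (fun kv => match kv.1.toList with
    | [c] => (kv.2.length : Int) ^ (s.count c)
    | _ => 1)).prod

-- the per-character "extra factor" B picks up when one more `c` is prepended
def pvE (d : List (String × List String)) (c : Char) : Int :=
  (d.map (fun kv => if kv.1.toList = [c] then (kv.2.length : Int) else 1)).prod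

theorem pv_foldl_mul {β : Type} (g : β → Int) (l : List β) (a : Int) :
    l.foldl (fun acc x => acc * g x) a = a * (l.map g).prod := by
  induction l generalizing a with
  | nil => simp
  | cons x xs ih => simp [List.foldl_cons, ih, mul_assoc]

theorem pvA_eq (string : String) (d : List (String × List String)) :
    predict_permutations string d = (string.toList.map (pvFac d)).prod := by
  unfold predict_permutations
  have h : (fun (total : Int) (char : Char) =>
      match pvLook d char with
      | some v => total * (v.length : Int)
      | none => total * 1) = fun total char => total * pvFac d char := by
    funext total char
    unfold pvFac
    cases pvLook d char <;> simp
  rw [h, pv_foldl_mul]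
  simp

-- Chars.count with a single-character needle counts occurrences of that character
theorem pv_count_go_single (c : Char) (s : List Char) (fuel acc : Nat)
    (h : s.length ≤ fuel) :
    PySem.Chars.count.go [c] fuel s acc = acc + s.count c := by
  induction s generalizing fuel acc with
  | nil => cases fuel <;> simp [PySem.Chars.count.go]
  | cons x t ih =>
    cases fuel with
    | zero => simp at h
    | succ n =>
      simp only [List.length_cons, Nat.add_le_add_iff_right] at h
      by_cases hx : c = x
      · subst hx
        simp [PySem.Chars.count.go, List.isPrefixOf, ih _ _ h, List.count_cons]
        omega
      · have hpf : ([c].isPrefixOf (x :: t)) = false := by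
          simp [List.isPrefixOf]
          intro hxc; exact hx hxc
        have hxc : (x == c) = false := by
          simp; exact fun h' => hx h'.symm
        simp [PySem.Chars.count.go, hpf, ih _ _ h, List.count_cons, hxc]

theorem pv_count_single (c : Char) (s : List Char) :
    PySem.Chars.count s [c] = s.count c := by
  simp [PySem.Chars.count, pv_count_go_single c s s.length 0 le_rfl]

theorem pvB_eq (string : String) (d : List (String × List String)) :
    predict_permutations_alt string d = pvF d string.toList := by
  unfold predict_permutations_alt pvF
  have h : (fun (total : Int) (kv : String × List String) =>
      if PySem.Str.len kv.1 == 1 then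
        total * (kv.2.length : Int) ^ (PySem.Str.count string kv.1)
      else total)
      = fun total kv => total * (match kv.1.toList with
          | [c] => (kv.2.length : Int) ^ (string.toList.count c)
          | _ => 1) := by
    funext total kv
    have hlen : PySem.Str.len kv.1 = (kv.1.toList.length : Int) := PySem.Str.len_eq kv.1
    by_cases h1 : kv.1.toList.length = 1
    · obtain ⟨c, hc⟩ := List.length_eq_one_iff.mp h1
      have hb : (PySem.Str.len kv.1 == 1) = true := by
        simp [hlen, h1]
      rw [hb, if_pos rfl, PySem.Str.count_eq, hc, pv_count_single]
    · have hb : (PySem.Str.len kv.1 == 1) = false := by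
        apply beq_eq_false_iff_ne.mpr
        rw [hlen]; exact_mod_cast h1
      rw [hb]
      simp only [Bool.false_eq_true, if_false]
      match hm : kv.1.toList with
      | [] => simp
      | [c] => exact absurd (by simp [hm]) h1
      | c :: c' :: t => simp
  rw [h, pv_foldl_mul]
  simp

theorem pvF_nil (d : List (String × List String)) : pvF d [] = 1 := by
  unfold pvF
  induction d with
  | nil => simp
  | cons kv t ih =>
    simp only [List.map_cons, List.prod_cons, ih, mul_one]
    match kv.1.toList with
    | [] => simp
    | [c] => simp
    | c :: c' :: t => simp

theorem pvF_cons (d : List (String × List String)) (c : Char) (s : List Char) :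
    pvF d (c :: s) = pvE d c * pvF d s := by
  unfold pvF pvE
  induction d with
  | nil => simp
  | cons kv t ih =>
    simp only [List.map_cons, List.prod_cons, ih]
    have : (match kv.1.toList with
        | [c'] => (kv.2.length : Int) ^ ((c :: s).count c')
        | _ => 1)
        = (if kv.1.toList = [c] then (kv.2.length : Int) else 1)
          * (match kv.1.toList with
            | [c'] => (kv.2.length : Int) ^ (s.count c')
            | _ => 1) := by
      match hm : kv.1.toList with
      | [] => simp
      | [c'] =>
        by_cases hcc : c' = c
        · subst hcc
          simp [List.count_cons, pow_succ, mul_comm]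
        · have hl2 : ¬([c'] = [c]) := by simp [hcc]
          have hcc2 : ¬(c = c') := fun h => hcc h.symm
          simp [List.count_cons, hcc2, hl2]
      | c' :: c'' :: t' => simp
    rw [this]; ring
  
theorem pvE_of_absent (d : List (String × List String)) (c : Char)
    (h : ∀ kv ∈ d, kv.1.toList ≠ [c]) : pvE d c = 1 := by
  unfold pvE
  induction d with
  | nil => simp
  | cons kv t ih =>
    simp only [List.map_cons, List.prod_cons]
    rw [if_neg (h kv (by simp)), ih (fun kv' h' => h kv' (by simp [h']))]
    simp

theorem pvE_eq_fac (d : List (String × List String)) (c : Char)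
    (hnd : (d.map Prod.fst).Nodup) : pvE d c = pvFac d c := by
  induction d with
  | nil => simp [pvE, pvFac, pvLook]
  | cons kv t ih =>
    simp only [List.map_cons, List.nodup_cons] at hnd
    by_cases hk : kv.1.toList = [c]
    · have habs : ∀ kv' ∈ t, kv'.1.toList ≠ [c] := by
        intro kv' h' hc
        exact hnd.1 (List.mem_map.mpr ⟨kv', h', by
          have : kv'.1 = kv.1 := by
            apply String.toList_inj.mp; rw [hc, hk]
          rw [this]⟩)
      unfold pvE pvFac pvLook
      simp only [List.map_cons, List.prod_cons, List.find?_cons]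
      rw [if_pos hk]
      have : (kv.1.toList == [c]) = true := by simpa using hk
      rw [this]
      have := pvE_of_absent t c habs
      unfold pvE at this
      simp [this]
    · unfold pvE pvFac pvLook
      simp only [List.map_cons, List.prod_cons, List.find?_cons]
      rw [if_neg hk]
      have : (kv.1.toList == [c]) = false := by simpa using hk
      rw [this]
      have := ih hnd.2
      unfold pvE pvFac pvLook at this
      simp [this]

theorem pvF_eq_prod_fac (d : List (String × List String)) (s : List Char)
    (hnd : (d.map Prod.fst).Nodup) : pvF d s = (s.map (pvFac d)).prod := by
  induction s with
  | nil => simp [pvF_nil]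
  | cons c t ih => rw [pvF_cons, ih, List.map_cons, List.prod_cons, pvE_eq_fac d c hnd]

-- ===== VERDICT (by name: the statement is the Claim_ definition above) =====
theorem predict_permutations_spec : Claim_equal_predict_permutations := by
  intro string leetspeak_dict _ hpre
  unfold Spec_predict_permutations
  rw [pvA_eq, pvB_eq, pvF_eq_prod_fac _ _ hpre]
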